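-- pv_equiv track=rewrite | github.com/TomLouarn/Ichimoku_based_strategies | Exos/Vacation Planning.py | max_days_fast
-- ===== SOURCE A (Python) =====
-- import math
--
-- cities = [
--     {"city": "Paris",  "flight": 200, "hotel": 20, "car": 200},
--     {"city": "London", "flight": 250, "hotel": 30, "car": 120},
--     {"city": "Dubai",  "flight": 370, "hotel": 15, "car": 80},
--     {"city": "Mumbai", "flight": 450, "hotel": 10, "car": 70},
-- ]
--
-- def final_price(city_row: dict, duration: int) -> float:
--     """
--     Calcule le coût total pour une ville donnée et une durée donnée.
--     """
--     flight = city_row["flight"]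
--     hotel  = city_row["hotel"] * duration
--     car    = city_row["car"] * math.ceil(duration / 7)  # semaine commencée
--     return flight + hotel + car
--
-- def max_days_fast(budget: int):
--     """
--     Même résultat que max_days_slow(), mais méthode de recherche binaire :
--     on divise l’intervalle [0, 365] en deux à chaque étape pour aller plus vite.
--     """
--     results = []
--
--     for row in cities:
--         lo, hi = 0, 365  # bornes de recherche (0 à 365 jours)
--         while lo < hi:
--             mid = (lo + hi + 1) // 2  # milieu (biaisé vers le haut)
--             if final_price(row, mid) <= budget:
--                 lo = mid  # mid abordable → on tente plus grand
--             else: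
--                 hi = mid - 1  # mid trop cher → on réduit
--         results.append((row["city"], lo))
--
--     # Extraction des séjours les plus longs et plus courts
--     max_d = max(results, key=lambda x: x[1])[1]
--     min_d = min(results, key=lambda x: x[1])[1]
--     longest  = [r for r in results if r[1] == max_d]
--     shortest = [r for r in results if r[1] == min_d]
--
--     return results, longest, shortest
-- ===== SOURCE B (Python) =====
-- import math
--
-- cities = [
--     {"city": "Paris",  "flight": 200, "hotel": 20, "car": 200},
--     {"city": "London", "flight": 250, "hotel": 30, "car": 120},
--     {"city": "Dubai",  "flight": 370, "hotel": 15, "car": 80},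
--     {"city": "Mumbai", "flight": 450, "hotel": 10, "car": 70},
-- ]
--
-- def _best_days(budget, flight, hotel, car):
--     # Closed-form per week: within week w (days 7*(w-1)+1 .. min(7*w, 365)) the
--     # price is flight + car*w + hotel*d, so the best affordable day count of the
--     # week is min(hi, (budget - flight - car*w) // hotel) when the week's first
--     # day is affordable.  365 days span weeks 1..53.
--     best = 0
--     for w in range(1, 54):
--         lo = 7 * (w - 1) + 1
--         hi = min(7 * w, 365)
--         rem = budget - flight - car * w
--         if rem >= hotel * lo:
--             best = max(best, min(hi, rem // hotel))
--     return best
--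
-- def max_days_fast(budget: int):
--     results = [(row["city"], _best_days(budget, row["flight"], row["hotel"], row["car"]))
--                for row in cities]
--     days = [d for _, d in results]
--     max_d = max(days)
--     min_d = min(days)
--     longest  = [r for r in results if r[1] == max_d]
--     shortest = [r for r in results if r[1] == min_d]
--     return results, longest, shortest
-- ===== Notes on version B (the rewrite author's own statement) =====
-- stated objective: alternative
-- what changed: Replaces each city's binary search over days 0..365 by a closed-form pass over the started weeks of the year: within a week the price is affine in the day count, so the week's best affordable day count is a floor division clamped to the week's day range, and the city's answer is the max over weeks; results are built by a list comprehension and max_d/min_d taken over the plain day list.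
import Mathlib
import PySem

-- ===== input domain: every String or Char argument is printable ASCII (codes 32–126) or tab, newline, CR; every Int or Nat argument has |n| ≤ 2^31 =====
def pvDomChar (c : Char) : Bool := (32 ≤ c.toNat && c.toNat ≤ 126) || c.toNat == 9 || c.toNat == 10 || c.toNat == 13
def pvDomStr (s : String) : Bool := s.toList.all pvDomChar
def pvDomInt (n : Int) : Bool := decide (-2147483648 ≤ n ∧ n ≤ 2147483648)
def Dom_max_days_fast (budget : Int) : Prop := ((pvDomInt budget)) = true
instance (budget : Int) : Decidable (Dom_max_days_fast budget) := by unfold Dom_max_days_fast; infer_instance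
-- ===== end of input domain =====

-- B replaces the per-city binary search over days by a closed-form pass over the
-- started weeks of the year (within a week the price is affine in the day count,
-- so the week's best day count is a floor division); objective: alternative algorithm.

-- ===== PORT A =====
-- the module-level `cities` table: (city, flight, hotel, car)
def pvCities : List (String × Int × Int × Int) :=
  [("Paris", 200, 20, 200), ("London", 250, 30, 120),
   ("Dubai", 370, 15, 80), ("Mumbai", 450, 10, 70)]

-- final_price(row, duration); math.ceil(duration / 7) is exact on these int
-- inputs and is ported as the integer ceiling -((-duration) // 7)
def pvFinalPrice (row : String × Int × Int × Int) (duration : Int) : Int :=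
  let flight := row.2.1
  let hotel := row.2.2.1 * duration
  let car := row.2.2.2 * (-(PySem.Int.floordiv (-duration) 7))
  flight + hotel + car

-- the `while lo < hi` binary-search loop of A
def pvBsLoop (budget : Int) (row : String × Int × Int × Int) (lo hi : Int) : Int :=
  if lo < hi then
    let mid := PySem.Int.floordiv (lo + hi + 1) 2
    if pvFinalPrice row mid ≤ budget then pvBsLoop budget row mid hi
    else pvBsLoop budget row lo (mid - 1)
  else lo
termination_by (hi - lo).toNat
decreasing_by
  all_goals
    simp only [PySem.Int.floordiv_eq_ediv_of_pos (show (0:Int) < 2 by norm_num)] at *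
  all_goals omega

def max_days_fast (budget : Int) : (List (String × Int)) × (List (String × Int)) × (List (String × Int)) :=
  let results := pvCities.foldl (fun acc row => acc ++ [(row.1, pvBsLoop budget row 0 365)]) []
  -- max(results, key=λx: x[1])[1] / min(…): the none branch is unreachable (cities ≠ [])
  let max_d := match PySem.List.max? results (fun x => x.2) with | some m => m.2 | none => 0
  let min_d := match PySem.List.min? results (fun x => x.2) with | some m => m.2 | none => 0
  let longest := results.filter (fun r => r.2 == max_d)
  let shortest := results.filter (fun r => r.2 == min_d)
  (results, longest, shortest)

-- ===== PORT B =====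
-- `_best_days`: one pass over the started weeks w = 1..53; week w covers days
-- 7*(w-1)+1 .. min(7*w, 365) and costs flight + car*w + hotel*d for d days,
-- so its best affordable day count is min(hi, (budget-flight-car*w) // hotel)
-- whenever the week's first day is affordable.
def pvBestDays (budget flight hotel car : Int) : Int :=
  (PySem.List.pyRange 1 54 1).foldl (fun best w =>
    let lo := 7 * (w - 1) + 1
    let hi := min (7 * w) 365
    let rem := budget - flight - car * w
    if hotel * lo ≤ rem then max best (min hi (PySem.Int.floordiv rem hotel)) else best) 0

def max_days_fast_alt (budget : Int) : (List (String × Int)) × (List (String × Int)) × (List (String × Int)) :=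
  let results := pvCities.map (fun row => (row.1, pvBestDays budget row.2.1 row.2.2.1 row.2.2.2))
  let days := results.map (fun p => p.2)
  -- max(days) / min(days) on the nonempty day list
  let max_d := match PySem.List.max? days (fun x => x) with | some m => m | none => 0
  let min_d := match PySem.List.min? days (fun x => x) with | some m => m | none => 0
  let longest := results.filter (fun r => r.2 == max_d)
  let shortest := results.filter (fun r => r.2 == min_d)
  (results, longest, shortest)

-- ===== PRECONDITION & SPEC =====
def Spec_max_days_fast (budget : Int) (out : (List (String × Int)) × (List (String × Int)) × (List (String × Int))) : Prop := out = max_days_fast_alt budget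
instance (budget : Int) (out : (List (String × Int)) × (List (String × Int)) × (List (String × Int))) : Decidable (Spec_max_days_fast budget out) := by unfold Spec_max_days_fast; infer_instance

-- ===== CLAIM (what is proved, stated in full; the proofs are below) =====
def Claim_equal_max_days_fast : Prop := ∀ (budget : Int), Dom_max_days_fast budget → Spec_max_days_fast budget (max_days_fast budget)

-- ===== LEMMAS AND PROOFS =====

-- the largest affordable duration in [1, n] (0 if none): the value A's search computes
def pvBestUpto (budget : Int) (row : String × Int × Int × Int) : Nat → Int
  | 0 => 0
  | n+1 => if pvFinalPrice row ((n : Int)+1) ≤ budget then ((n : Int)+1) else pvBestUpto budget row n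

lemma pvCeil7_mono {a b : Int} (h : a ≤ b) :
    -(PySem.Int.floordiv (-a) 7) ≤ -(PySem.Int.floordiv (-b) 7) := by
  have ha := PySem.Int.floordiv_mul_add_mod (-a) 7
  have hb := PySem.Int.floordiv_mul_add_mod (-b) 7
  have ha1 := PySem.Int.mod_nonneg (-a) (show (0:Int) < 7 by norm_num)
  have ha2 := PySem.Int.mod_lt (-a) (show (0:Int) < 7 by norm_num)
  have hb1 := PySem.Int.mod_nonneg (-b) (show (0:Int) < 7 by norm_num)
  have hb2 := PySem.Int.mod_lt (-b) (show (0:Int) < 7 by norm_num)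
  omega

lemma pvPrice_mono (row : String × Int × Int × Int) (hh : 0 ≤ row.2.2.1) (hc : 0 ≤ row.2.2.2)
    {a b : Int} (h : a ≤ b) : pvFinalPrice row a ≤ pvFinalPrice row b := by
  have h1 := pvCeil7_mono h
  have h2 := mul_le_mul_of_nonneg_left h hh
  have h3 := mul_le_mul_of_nonneg_left h1 hc
  simp only [pvFinalPrice]
  omega

lemma pvBestUpto_bounds (budget : Int) (row : String × Int × Int × Int) (n : Nat) :
    0 ≤ pvBestUpto budget row n ∧ pvBestUpto budget row n ≤ (n : Int) := by
  induction n with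
  | zero => simp [pvBestUpto]
  | succ m ih =>
    simp only [pvBestUpto]
    split_ifs with hif
    · constructor
      · positivity
      · push_cast; omega
    · push_cast; omega

lemma pvBestUpto_ge (budget : Int) (row : String × Int × Int × Int) (n : Nat) (d : Int)
    (h1 : 1 ≤ d) (h2 : d ≤ (n : Int)) (hp : pvFinalPrice row d ≤ budget) :
    d ≤ pvBestUpto budget row n := by
  induction n with
  | zero => simp at h2; omega
  | succ m ih =>
    simp only [pvBestUpto]
    split_ifs with hif
    · push_cast at h2 ⊢; omega
    · have hd : d ≠ (m : Int) + 1 := by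
        intro he; rw [he] at hp; exact hif hp
      have : d ≤ (m : Int) := by push_cast at h2; omega
      exact ih this

lemma pvBestUpto_afford (budget : Int) (row : String × Int × Int × Int) (n : Nat) :
    pvBestUpto budget row n = 0 ∨ pvFinalPrice row (pvBestUpto budget row n) ≤ budget := by
  induction n with
  | zero => left; rfl
  | succ m ih =>
    simp only [pvBestUpto]
    split_ifs with hif
    · right; exact hif
    · exact ih

lemma pvBs_eq (budget : Int) (row : String × Int × Int × Int)
    (hh : 0 ≤ row.2.2.1) (hc : 0 ≤ row.2.2.2) :
    ∀ (k : Nat) (lo hi : Int), (hi - lo).toNat ≤ k → 0 ≤ lo →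
      lo ≤ pvBestUpto budget row 365 → pvBestUpto budget row 365 ≤ hi → hi ≤ 365 →
      pvBsLoop budget row lo hi = pvBestUpto budget row 365 := by
  intro k
  induction k with
  | zero =>
    intro lo hi hk h0 h1 h2 h3
    have : ¬ lo < hi := by omega
    rw [pvBsLoop, if_neg this]
    omega
  | succ k ih =>
    intro lo hi hk h0 h1 h2 h3
    by_cases hlt : lo < hi
    · rw [pvBsLoop, if_pos hlt]
      simp only
      set mid := PySem.Int.floordiv (lo + hi + 1) 2 with hmiddef
      have hmid : lo + 1 ≤ mid ∧ mid ≤ hi := by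
        rw [hmiddef, PySem.Int.floordiv_eq_ediv_of_pos (by norm_num)]
        omega
      split_ifs with haff
      · have hle : mid ≤ pvBestUpto budget row 365 :=
          pvBestUpto_ge budget row 365 mid (by omega) (by push_cast; omega) haff
        exact ih mid hi (by omega) (by omega) hle h2 h3
      · have hB : pvBestUpto budget row 365 ≤ mid - 1 := by
          by_contra hcon
          have hmb : mid ≤ pvBestUpto budget row 365 := by omega
          rcases pvBestUpto_afford budget row 365 with h0' | h0'
          · omega
          · exact haff (le_trans (pvPrice_mono row hh hc hmb) h0')
        exact ih lo (mid - 1) (by omega) h0 h1 hB (by omega)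
    · rw [pvBsLoop, if_neg hlt]
      omega

-- B's week loop as a structural recursion over the number of weeks processed
def pvWeekBest (budget f h c : Int) : Nat → Int
  | 0 => 0
  | n+1 =>
    let w : Int := (n : Int) + 1
    let lo := 7 * (w - 1) + 1
    let hi := min (7 * w) 365
    let rem := budget - f - c * w
    if h * lo ≤ rem then max (pvWeekBest budget f h c n) (min hi (PySem.Int.floordiv rem h))
    else pvWeekBest budget f h c n

lemma pvWeekFold_eq (budget f h c : Int) (n : Nat) :
    (PySem.List.pyRange 1 (1 + (n : Int)) 1).foldl (fun best w =>
      let lo := 7 * (w - 1) + 1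
      let hi := min (7 * w) 365
      let rem := budget - f - c * w
      if h * lo ≤ rem then max best (min hi (PySem.Int.floordiv rem h)) else best) 0
      = pvWeekBest budget f h c n := by
  induction n with
  | zero => simp [PySem.List.pyRange_one_eq_nil, pvWeekBest]
  | succ m ih =>
    have hc' : (1 : Int) + ((m+1 : Nat) : Int) = (1 + (m : Int)) + 1 := by push_cast; ring
    rw [hc', PySem.List.pyRange_one_succ_right (by omega), List.foldl_append, ih]
    simp only [List.foldl, pvWeekBest]
    have he : (1 : Int) + (m : Int) = (m : Int) + 1 := by ring
    rw [he]

lemma pvBestDays_eq_weekBest (budget f h c : Int) :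
    pvBestDays budget f h c = pvWeekBest budget f h c 53 := by
  have hfold := pvWeekFold_eq budget f h c 53
  norm_num at hfold
  simpa [pvBestDays] using hfold

-- ceiling of d/7 is w exactly on week w's day range
lemma pvCeil7_of_week (w d : Int) (h1 : 7 * (w - 1) + 1 ≤ d) (h2 : d ≤ 7 * w) :
    -(PySem.Int.floordiv (-d) 7) = w := by
  have hd := PySem.Int.floordiv_mul_add_mod (-d) 7
  have hm1 := PySem.Int.mod_nonneg (-d) (show (0:Int) < 7 by norm_num)
  have hm2 := PySem.Int.mod_lt (-d) (show (0:Int) < 7 by norm_num)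
  omega

lemma pvWeekBest_nonneg (budget f h c : Int) (n : Nat) :
    0 ≤ pvWeekBest budget f h c n := by
  induction n with
  | zero => simp [pvWeekBest]
  | succ m ih =>
    simp only [pvWeekBest]
    split_ifs with hif
    · exact le_trans ih (le_max_left _ _)
    · exact ih

-- every week's candidate is an affordable day count in [1, 365] (weeks ≤ 53)
lemma pvCand_afford (budget : Int) (s : String) (f h c : Int) (hh : 0 < h) (w : Int)
    (hw1 : 1 ≤ w) (hw2 : w ≤ 53)
    (hcond : h * (7 * (w - 1) + 1) ≤ budget - f - c * w) :
    1 ≤ min (min (7 * w) 365) (PySem.Int.floordiv (budget - f - c * w) h) ∧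
    min (min (7 * w) 365) (PySem.Int.floordiv (budget - f - c * w) h) ≤ 365 ∧
    pvFinalPrice (s, f, h, c) (min (min (7 * w) 365) (PySem.Int.floordiv (budget - f - c * w) h)) ≤ budget := by
  set lo : Int := 7 * (w - 1) + 1 with hlo
  set rem : Int := budget - f - c * w with hrem
  set q : Int := PySem.Int.floordiv rem h with hq
  have hloq : lo ≤ q := by
    rw [hq]
    rw [PySem.Int.le_floordiv_iff_mul_le hh]
    calc lo * h = h * lo := by ring
      _ ≤ rem := hcond
  have hqh : q * h ≤ rem := by
    rw [hq]; exact (PySem.Int.le_floordiv_iff_mul_le hh).mp le_rfl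
  set d : Int := min (min (7 * w) 365) q with hd
  have hlohi : lo ≤ min (7 * w) 365 := by omega
  have hdlo : lo ≤ d := le_min hlohi hloq
  have hd365 : d ≤ 365 := le_trans (min_le_left _ _) (min_le_right _ _)
  have hd7w : d ≤ 7 * w := le_trans (min_le_left _ _) (min_le_left _ _)
  refine ⟨by omega, hd365, ?_⟩
  have hdq : d ≤ q := min_le_right _ _
  have hceil : -(PySem.Int.floordiv (-d) 7) = w := pvCeil7_of_week w d (by omega) hd7w
  have hmul : h * d ≤ h * q := mul_le_mul_of_nonneg_left hdq (le_of_lt hh)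
  simp only [pvFinalPrice, hceil]
  have : h * q ≤ rem := by calc h * q = q * h := by ring
                                _ ≤ rem := hqh
  omega

lemma pvWeekBest_le (budget : Int) (s : String) (f h c : Int) (hh : 0 < h) (n : Nat)
    (hn : n ≤ 53) :
    pvWeekBest budget f h c n ≤ pvBestUpto budget (s, f, h, c) 365 := by
  induction n with
  | zero =>
    have := pvBestUpto_bounds budget (s, f, h, c) 365
    simp only [pvWeekBest]; omega
  | succ m ih =>
    simp only [pvWeekBest]
    split_ifs with hif
    · refine max_le (ih (by omega)) ?_
      obtain ⟨h1, h2, h3⟩ := pvCand_afford budget s f h c hh ((m : Int) + 1)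
        (by omega) (by omega) hif
      exact pvBestUpto_ge budget (s, f, h, c) 365 _ h1 (by push_cast; omega) h3
    · exact ih (by omega)

lemma pvWeekBest_step_le (budget f h c : Int) (m : Nat) :
    pvWeekBest budget f h c m ≤ pvWeekBest budget f h c (m + 1) := by
  simp only [pvWeekBest]
  split_ifs with hif
  · exact le_max_left _ _
  · exact le_rfl

lemma pvWeekBest_reach (budget f h c : Int) (w : Int) (hw1 : 1 ≤ w)
    (hcond : h * (7 * (w - 1) + 1) ≤ budget - f - c * w) :
    ∀ n : Nat, w ≤ (n : Int) →
      min (min (7 * w) 365) (PySem.Int.floordiv (budget - f - c * w) h) ≤ pvWeekBest budget f h c n := by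
  intro n
  induction n with
  | zero => intro hle; simp at hle; omega
  | succ m ih =>
    intro hle
    by_cases hw : w = (m : Int) + 1
    · simp only [pvWeekBest]
      rw [← hw]
      rw [if_pos hcond]
      exact le_max_right _ _
    · have : w ≤ (m : Int) := by push_cast at hle; omega
      exact le_trans (ih (by exact_mod_cast this)) (pvWeekBest_step_le budget f h c m)

lemma pvBest_le_weekBest (budget : Int) (s : String) (f h c : Int) (hh : 0 < h) :
    pvBestUpto budget (s, f, h, c) 365 ≤ pvWeekBest budget f h c 53 := by
  set P := pvBestUpto budget (s, f, h, c) 365 with hP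
  have hb := pvBestUpto_bounds budget (s, f, h, c) 365
  by_cases h0 : P = 0
  · rw [h0]; exact pvWeekBest_nonneg budget f h c 53
  · have hP1 : 1 ≤ P := by omega
    have hP365 : P ≤ 365 := by rw [hP]; exact_mod_cast hb.2
    rcases pvBestUpto_afford budget (s, f, h, c) 365 with he | haff
    · omega
    · rw [← hP] at haff
      -- w = ceil(P/7): the week containing day P
      set w : Int := -(PySem.Int.floordiv (-P) 7) with hw
      have hd := PySem.Int.floordiv_mul_add_mod (-P) 7
      have hm1 := PySem.Int.mod_nonneg (-P) (show (0:Int) < 7 by norm_num)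
      have hm2 := PySem.Int.mod_lt (-P) (show (0:Int) < 7 by norm_num)
      have hwlo : 7 * (w - 1) + 1 ≤ P := by omega
      have hwhi : P ≤ 7 * w := by omega
      have hw1 : 1 ≤ w := by omega
      have hw53 : w ≤ 53 := by omega
      have haff' : f + h * P + c * w ≤ budget := by
        have heq : pvFinalPrice (s, f, h, c) P = f + h * P + c * w := by
          simp only [pvFinalPrice]; rw [← hw]
        omega
      set rem : Int := budget - f - c * w with hrem
      have hhp : h * P ≤ rem := by omega
      have hcond : h * (7 * (w - 1) + 1) ≤ rem := by
        have := mul_le_mul_of_nonneg_left hwlo (le_of_lt hh)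
        omega
      have hPq : P ≤ PySem.Int.floordiv rem h := by
        rw [PySem.Int.le_floordiv_iff_mul_le hh]
        calc P * h = h * P := by ring
          _ ≤ rem := hhp
      have hPd : P ≤ min (min (7 * w) 365) (PySem.Int.floordiv rem h) :=
        le_min (le_min hwhi hP365) hPq
      exact le_trans hPd (pvWeekBest_reach budget f h c w hw1 hcond 53 (by push_cast; omega))

lemma pvRow_eq (budget : Int) (s : String) (f h c : Int) (hh : 0 < h) (hc : 0 ≤ c) :
    pvBsLoop budget (s, f, h, c) 0 365 = pvBestDays budget f h c := by
  have hb := pvBestUpto_bounds budget (s, f, h, c) 365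
  have hA : pvBsLoop budget (s, f, h, c) 0 365 = pvBestUpto budget (s, f, h, c) 365 :=
    pvBs_eq budget (s, f, h, c) (by simpa using le_of_lt hh) (by simpa using hc)
      365 0 365 (by omega) (by omega) hb.1 (by exact_mod_cast hb.2) (by omega)
  rw [hA, pvBestDays_eq_weekBest]
  exact le_antisymm (pvBest_le_weekBest budget s f h c hh)
    (pvWeekBest_le budget s f h c hh 53 (by omega))

-- the two extractions agree: max/min with key x[1] projected to [1] vs max/min of the day list
lemma pvMax4_snd (p q r s : String × Int) :
    (match PySem.List.max? [p, q, r, s] (fun x => x.2) with | some m => m.2 | none => 0)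
      = (match PySem.List.max? [p.2, q.2, r.2, s.2] (fun x => x) with | some m => m | none => 0) := by
  simp only [PySem.List.max?, List.foldl]
  split_ifs <;> simp <;> split_ifs <;> simp <;> split_ifs <;> simp

lemma pvMin4_snd (p q r s : String × Int) :
    (match PySem.List.min? [p, q, r, s] (fun x => x.2) with | some m => m.2 | none => 0)
      = (match PySem.List.min? [p.2, q.2, r.2, s.2] (fun x => x) with | some m => m | none => 0) := by
  simp only [PySem.List.min?, List.foldl]
  split_ifs <;> simp <;> split_ifs <;> simp <;> split_ifs <;> simp

-- ===== VERDICT (by name: the statement is the Claim_ definition above) =====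
theorem max_days_fast_spec : Claim_equal_max_days_fast := by
  intro budget _
  unfold Spec_max_days_fast max_days_fast max_days_fast_alt
  simp only [pvCities, List.foldl, List.map, List.nil_append, List.cons_append]
  rw [pvRow_eq budget "Paris" 200 20 200 (by norm_num) (by norm_num),
      pvRow_eq budget "London" 250 30 120 (by norm_num) (by norm_num),
      pvRow_eq budget "Dubai" 370 15 80 (by norm_num) (by norm_num),
      pvRow_eq budget "Mumbai" 450 10 70 (by norm_num) (by norm_num)]
  rw [pvMax4_snd, pvMin4_snd]
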